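-- pv_equiv track=rewrite | github.com/CharleyHan77/Dispatch_Sample_Generator | initial_validation/genetic/encoding_extends.py | generateOS_MOPNR
-- ===== SOURCE A (Python) =====
-- from typing import List, Tuple, Dict, Any
--
-- def generateOS_MOPNR(parameters: Dict[str, Any]) -> List[int]:
--     """
--     MOPNR (Most Operations Not Ready) 工序排序：选择剩余待完成操作数最多的作业
--     按照作业的工序数量排序，工序数量多的作业优先调度
--
--     Args:
--         parameters: 问题参数字典
--
--     Returns:
--         List[int]: 工序序列
--     """
--     jobs = parameters['jobs']
--     OS = []
--
--     # MOPNR策略：按照作业的工序数量排序（工序数量多的优先）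
--     # 计算每个作业的工序数量
--     job_operation_counts = [(job_idx, len(jobs[job_idx])) for job_idx in range(len(jobs))]
--
--     # 按照工序数量降序排序（工序数量多的优先）
--     job_priority = sorted(job_operation_counts, key=lambda x: x[1], reverse=True)
--
--     # 按照作业优先级生成工序
--     for job_idx, _ in job_priority:
--         for op in jobs[job_idx]:
--             if op:  # 确保工序有效
--                 OS.append(job_idx)
--
--     return OS
-- ===== SOURCE B (Python) =====
-- def generateOS_MOPNR(parameters):
--     jobs = parameters['jobs']
--     # Bucket (counting) sort: group job indices by operation count, track the max.
--     buckets = {}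
--     max_count = 0
--     for job_idx in range(len(jobs)):
--         c = len(jobs[job_idx])
--         buckets.setdefault(c, []).append(job_idx)
--         if c > max_count:
--             max_count = c
--     OS = []
--     for c in range(max_count, 0, -1):
--         for job_idx in buckets.get(c, []):
--             for op in jobs[job_idx]:
--                 if op:
--                     OS.append(job_idx)
--     return OS
-- ===== Notes on version B (the rewrite author's own statement) =====
-- stated objective: alternative
-- what changed: Replaced the comparison sort of (index, count) tuples with a counting/bucket pass: a dict maps each operation count to its job indices (ascending), and a descending sweep over counts from the tracked maximum emits the sequence.
import Mathlib
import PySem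

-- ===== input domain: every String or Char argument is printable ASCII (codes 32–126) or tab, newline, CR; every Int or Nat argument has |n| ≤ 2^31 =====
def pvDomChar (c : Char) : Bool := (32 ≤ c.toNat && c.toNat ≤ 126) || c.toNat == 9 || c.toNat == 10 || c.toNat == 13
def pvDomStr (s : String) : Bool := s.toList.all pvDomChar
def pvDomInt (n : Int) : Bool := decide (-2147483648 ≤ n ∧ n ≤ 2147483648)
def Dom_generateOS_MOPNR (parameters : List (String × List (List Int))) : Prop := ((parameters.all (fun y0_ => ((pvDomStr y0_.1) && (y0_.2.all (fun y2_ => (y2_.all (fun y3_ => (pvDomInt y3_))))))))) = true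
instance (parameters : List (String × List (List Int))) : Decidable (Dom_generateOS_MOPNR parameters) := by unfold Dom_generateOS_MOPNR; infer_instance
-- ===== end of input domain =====

-- B replaces A's comparison sort of (index, count) pairs by a counting/bucket pass
-- (dict of count → job indices, then a descending sweep over counts): alternative algorithm.


-- ===== PORT A =====
def generateOS_MOPNR (parameters : List (String × List (List Int))) : List Int :=
  match (PySem.Dict.mk parameters).get? "jobs" with
  | none => []  -- KeyError in Python; excluded by Pre_
  | some jobs =>
    let jobOperationCounts := (PySem.List.pyRange 0 (PySem.List.len jobs) 1).map
        (fun i => (i, PySem.List.len (PySem.List.pyGetD jobs i [])))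
    let jobPriority := PySem.List.sorted jobOperationCounts (fun x => x.2) true
    jobPriority.foldl (fun OS p =>
      (PySem.List.pyGetD jobs p.1 []).foldl
        (fun OS op => if op ≠ 0 then OS ++ [p.1] else OS) OS) []

-- ===== PORT B =====
def generateOS_MOPNR_alt (parameters : List (String × List (List Int))) : List Int :=
  match (PySem.Dict.mk parameters).get? "jobs" with
  | none => []  -- KeyError in Python; excluded by Pre_
  | some jobs =>
    let bm := (PySem.List.pyRange 0 (PySem.List.len jobs) 1).foldl
        (fun (s : PySem.Dict Int (List Int) × Int) i =>
          let c := PySem.List.len (PySem.List.pyGetD jobs i [])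
          (s.1.modify c [] (fun l => l ++ [i]), if c > s.2 then c else s.2))
        (PySem.Dict.empty, 0)
    (PySem.List.pyRange bm.2 0 (-1)).foldl (fun OS c =>
      (bm.1.getD c []).foldl (fun OS i =>
        (PySem.List.pyGetD jobs i []).foldl
          (fun OS op => if op ≠ 0 then OS ++ [i] else OS) OS) OS) []

-- ===== PRECONDITION & SPEC =====
-- Pre_ excludes exactly the inputs with no "jobs" key, on which Python A (and B) raise KeyError.
def Pre_generateOS_MOPNR (parameters : List (String × List (List Int))) : Prop :=
  (PySem.Dict.mk parameters).contains "jobs" = true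
instance (parameters : List (String × List (List Int))) : Decidable (Pre_generateOS_MOPNR parameters) := by unfold Pre_generateOS_MOPNR; infer_instance
def pvWitness_generateOS_MOPNR : (List (String × List (List Int))) := [("jobs", [[1],[0,2],[3,0,0],[]])]

def Spec_generateOS_MOPNR (parameters : List (String × List (List Int))) (out : List Int) : Prop := out = generateOS_MOPNR_alt parameters
instance (parameters : List (String × List (List Int))) (out : List Int) : Decidable (Spec_generateOS_MOPNR parameters out) := by unfold Spec_generateOS_MOPNR; infer_instance

-- ===== CLAIM (what is proved, stated in full; the proofs are below) =====
def Claim_equal_generateOS_MOPNR : Prop := ∀ (parameters : List (String × List (List Int))), Dom_generateOS_MOPNR parameters → Pre_generateOS_MOPNR parameters → Spec_generateOS_MOPNR parameters (generateOS_MOPNR parameters)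

-- ===== LEMMAS AND PROOFS =====

-- insertBy passes over elements it is not ordered before
theorem insertBy_skip {α : Type} (before : α → α → Bool) (x : α) (l1 l2 : List α)
    (h : ∀ y ∈ l1, before x y = false) :
    PySem.List.insertBy before x (l1 ++ l2) = l1 ++ PySem.List.insertBy before x l2 := by
  induction l1 with
  | nil => simp
  | cons y t ih =>
    have hy := h y (by simp)
    simp only [List.cons_append, PySem.List.insertBy, hy]
    simp only [Bool.false_eq_true, if_false, List.cons.injEq, true_and]
    exact ih (fun z hz => h z (by simp [hz]))

theorem insertBy_all_before {α : Type} (before : α → α → Bool) (x : α) (l : List α)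
    (h : ∀ y ∈ l, before x y = true) :
    PySem.List.insertBy before x l = x :: l := by
  cases l with
  | nil => rfl
  | cons y t => simp [PySem.List.insertBy, h y (by simp)]

-- one insertion step preserves the bucket decomposition
theorem insertBy_bucket {α : Type} (key : α → Int) (x : α) (ks : List Int)
    (hks : ks.Pairwise (· > ·)) (xs : List α) (hx : key x ∈ ks) :
    PySem.List.insertBy (fun a b => decide (key b < key a)) x
        (ks.flatMap (fun c => xs.filter (fun z => key z == c)))
      = ks.flatMap (fun c => (xs ++ [x]).filter (fun z => key z == c)) := by
  induction ks with
  | nil => simp at hx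
  | cons k ks' ih =>
    rcases List.pairwise_cons.mp hks with ⟨h1, h2⟩
    have hBk : ∀ y ∈ xs.filter (fun z => key z == k), key y = k := by
      intro y hy; simpa using (List.mem_filter.mp hy).2
    simp only [List.flatMap_cons]
    rcases List.mem_cons.mp hx with hk | hk'
    · -- key x = k : x goes at the end of the first bucket
      have hrest : ∀ y ∈ ks'.flatMap (fun c => xs.filter (fun z => key z == c)),
          decide (key y < key x) = true := by
        intro y hy
        rcases List.mem_flatMap.mp hy with ⟨c, hc, hyc⟩
        have : key y = c := by simpa using (List.mem_filter.mp hyc).2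
        simp [this, hk]; exact h1 c hc
      rw [insertBy_skip _ _ _ _ (by intro y hy; simp [hBk y hy, hk]),
          insertBy_all_before _ _ _ hrest]
      have e1 : (xs ++ [x]).filter (fun z => key z == k) =
          xs.filter (fun z => key z == k) ++ [x] := by
        simp [List.filter_append, hk]
      have e2 : ks'.flatMap (fun c => (xs ++ [x]).filter (fun z => key z == c)) =
          ks'.flatMap (fun c => xs.filter (fun z => key z == c)) := by
        apply List.flatMap_congr
        intro c hc
        have : key x ≠ c := by have := h1 c hc; omega
        simp [List.filter_append, this]
      rw [e1, e2]; simp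
    · -- key x belongs to a later bucket
      have hne : key x ≠ k := by have := h1 _ hk'; omega
      rw [insertBy_skip _ _ _ _ (by intro y hy; simp [hBk y hy]; have := h1 _ hk'; omega),
          ih h2 hk']
      have : (xs ++ [x]).filter (fun z => key z == k) = xs.filter (fun z => key z == k) := by
        simp [List.filter_append, hne]
      rw [this]

-- Python's stable reverse sort IS the concatenation of the key buckets in descending key order
theorem sorted_rev_bucket {α : Type} (key : α → Int) (ks : List Int)
    (hks : ks.Pairwise (· > ·)) (xs : List α) (hall : ∀ z ∈ xs, key z ∈ ks) :
    PySem.List.sorted xs key true = ks.flatMap (fun c => xs.filter (fun z => key z == c)) := by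
  induction xs using List.reverseRecOn with
  | nil => simp [PySem.List.sorted]
  | append_singleton xs x ih =>
    rw [PySem.List.sorted_rev_eq_foldl_insertBy, List.foldl_append]
    simp only [List.foldl_cons, List.foldl_nil]
    rw [← PySem.List.sorted_rev_eq_foldl_insertBy,
        ih (fun z hz => hall z (by simp [hz])),
        insertBy_bucket key x ks hks xs (hall x (by simp))]

theorem pyRange_desc (m : Int) :
    PySem.List.pyRange m 0 (-1) = (List.range m.toNat).map (fun k : Nat => m - (k : Int)) := by
  by_cases h : 0 < m
  · simp only [PySem.List.pyRange, if_neg (by norm_num : ¬((-1 : Int) = 0)),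
      if_neg (by norm_num : ¬(0 < (-1:Int))), if_pos h]
    have e : (m - 0 + - -1 - 1) / - -1 = m := by norm_num
    rw [e]
    apply List.map_congr_left
    intro k _
    ring
  · simp only [PySem.List.pyRange, if_neg (by norm_num : ¬((-1 : Int) = 0)),
      if_neg (by norm_num : ¬(0 < (-1:Int))), if_neg h]
    have : m.toNat = 0 := by omega
    simp [this]

-- the bucket dict built by B's first loop, looked up at a count c
theorem getD_bucket (kf : Int → Int) (is : List Int) :
    ∀ (d0 : PySem.Dict Int (List Int)) (c : Int),
    (is.foldl (fun d i => d.modify (kf i) [] (fun l => l ++ [i])) d0).getD c []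
      = d0.getD c [] ++ is.filter (fun i => kf i == c) := by
  induction is with
  | nil => simp
  | cons i t ih =>
    intro d0 c
    simp only [List.foldl_cons, ih]
    rw [PySem.Dict.modify, PySem.Dict.getD_insert]
    by_cases h : c = kf i
    · simp [h]
    · have : ¬ (kf i == c) = true := by simpa using fun e => h e.symm
      simp [h, this]

-- the two nested appending loops ('for op in jobs[i]: if op: OS.append(i)') as a flatMap
theorem inner_shape (jobs : List (List Int)) (l : List Int) (acc : List Int) :
    l.foldl (fun OS i =>
        (PySem.List.pyGetD jobs i []).foldl
          (fun OS op => if op ≠ 0 then OS ++ [i] else OS) OS) acc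
      = acc ++ l.flatMap (fun i =>
          ((PySem.List.pyGetD jobs i []).filter (fun op => decide (op ≠ 0))).map (fun _ => i)) := by
  have e : (fun (OS : List Int) i =>
        (PySem.List.pyGetD jobs i []).foldl
          (fun OS op => if op ≠ 0 then OS ++ [i] else OS) OS)
      = (fun OS i => OS ++ ((PySem.List.pyGetD jobs i []).filter (fun op => decide (op ≠ 0))).map (fun _ => i)) := by
    funext OS i
    exact PySem.List.foldl_append_ite (fun op => op ≠ 0) (fun _ => i) _ OS
  rw [e, PySem.List.foldl_append_eq_flatMap]

-- ===== VERDICT (by name: the statement is the Claim_ definition above) =====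
theorem generateOS_MOPNR_spec : Claim_equal_generateOS_MOPNR := by
  intro parameters _ hpre
  unfold Pre_generateOS_MOPNR at hpre
  unfold Spec_generateOS_MOPNR generateOS_MOPNR generateOS_MOPNR_alt
  cases hj : (PySem.Dict.mk parameters).get? "jobs" with
  | none =>
    exfalso
    simp only [PySem.Dict.contains, List.any_eq_true] at hpre
    obtain ⟨p, hp, hb⟩ := hpre
    simp only [PySem.Dict.get?, Option.map_eq_none_iff, List.find?_eq_none] at hj
    exact absurd hb (by simpa using hj p hp)
  | some jobs =>
    simp only []
    -- abbreviations
    set is := PySem.List.pyRange 0 (PySem.List.len jobs) 1 with his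
    set kf : Int → Int := fun i => PySem.List.len (PySem.List.pyGetD jobs i []) with hkf
    set contrib : Int → List Int :=
      fun i => ((PySem.List.pyGetD jobs i []).filter (fun op => decide (op ≠ 0))).map (fun _ => i)
      with hcontrib
    -- split B's pair fold into the dict fold and the max fold
    rw [PySem.List.foldl_prod_mk
      (f := fun d i => PySem.Dict.modify d (kf i) [] (fun l => l ++ [i]))
      (g := fun m i => if kf i > m then kf i else m)]
    set M := is.foldl (fun m i => if kf i > m then kf i else m) 0 with hMdef
    have hMmax : M = is.foldl (fun m i => max m (kf i)) 0 := by
      rw [hMdef]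
      congr 1
      funext m i
      rcases lt_trichotomy (kf i) m with h | h | h <;> simp [max_def] <;> omega
    have hM0 : (0:Int) ≤ M := by
      rw [hMmax]; exact (PySem.List.le_foldl_max_int is kf 0).1
    have hMub : ∀ i ∈ is, kf i ≤ M := by
      rw [hMmax]; exact (PySem.List.le_foldl_max_int is kf 0).2
    -- B's output
    have hB : (PySem.List.pyRange M 0 (-1)).foldl (fun OS c =>
          ((is.foldl (fun d i => PySem.Dict.modify d (kf i) [] (fun l => l ++ [i]))
              PySem.Dict.empty).getD c []).foldl (fun OS i =>
            (PySem.List.pyGetD jobs i []).foldl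
              (fun OS op => if op ≠ 0 then OS ++ [i] else OS) OS) OS) []
        = (PySem.List.pyRange M 0 (-1)).flatMap
            (fun c => (is.filter (fun i => kf i == c)).flatMap contrib) := by
      have e : (fun (OS : List Int) c =>
            ((is.foldl (fun d i => PySem.Dict.modify d (kf i) [] (fun l => l ++ [i]))
                PySem.Dict.empty).getD c []).foldl (fun OS i =>
              (PySem.List.pyGetD jobs i []).foldl
                (fun OS op => if op ≠ 0 then OS ++ [i] else OS) OS) OS)
          = (fun OS c => OS ++ (is.filter (fun i => kf i == c)).flatMap contrib) := by
        funext OS c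
        rw [inner_shape, getD_bucket]
        simp [PySem.Dict.getD, PySem.Dict.get?, PySem.Dict.empty, hcontrib]
      rw [e, PySem.List.foldl_append_eq_flatMap, List.nil_append]
    rw [hB]
    -- A's output: name the descending key list
    set ks : List Int := PySem.List.pyRange M 0 (-1) ++ [0] with hks
    have hksdesc : ks.Pairwise (· > ·) := by
      rw [hks, pyRange_desc]
      rw [List.pairwise_append]
      refine ⟨(List.pairwise_map).mpr (List.pairwise_lt_range.imp ?_), by simp, ?_⟩
      · intro a b hab; omega
      · intro x hx y hy
        rcases List.mem_map.mp hx with ⟨k, hk, rfl⟩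
        have := List.mem_range.mp hk
        simp at hy
        omega
    have hmemks : ∀ c : Int, 0 ≤ c → c ≤ M → c ∈ ks := by
      intro c h0 hM
      rw [hks, pyRange_desc]
      rcases eq_or_lt_of_le h0 with h | h
      · simp [← h]
      · apply List.mem_append_left
        apply List.mem_map.mpr
        exact ⟨(M - c).toNat, List.mem_range.mpr (by omega), by omega⟩
    -- sort the (index, count) pairs into buckets
    have hsorted : PySem.List.sorted (is.map (fun i => (i, kf i))) (fun x => x.2) true
        = ks.flatMap (fun c => (is.map (fun i => (i, kf i))).filter (fun z => z.2 == c)) := by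
      apply sorted_rev_bucket _ ks hksdesc
      intro z hz
      rcases List.mem_map.mp hz with ⟨i, hi, rfl⟩
      exact hmemks _ (by simp [hkf, PySem.List.len]) (hMub i hi)
    have eA : (fun (OS : List Int) (p : Int × Int) =>
          (PySem.List.pyGetD jobs p.1 []).foldl
            (fun OS op => if op ≠ 0 then OS ++ [p.1] else OS) OS)
        = (fun OS p => OS ++ contrib p.1) := by
      funext OS p
      exact PySem.List.foldl_append_ite (fun op => op ≠ 0) (fun _ => p.1) _ OS
    rw [hsorted, eA, PySem.List.foldl_append_eq_flatMap, List.nil_append, List.flatMap_assoc]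
    -- per-bucket: pairs reduce to indices
    have hbucket : ∀ c : Int,
        ((is.map (fun i => (i, kf i))).filter (fun z => z.2 == c)).flatMap
            (fun i => contrib i.1)
          = (is.filter (fun i => kf i == c)).flatMap contrib := by
      intro c
      rw [List.filter_map, List.flatMap_map]
      rfl
    -- the contribution of the 0-count bucket is empty
    have hzero : (is.filter (fun i => kf i == (0:Int))).flatMap contrib = [] := by
      apply List.flatMap_eq_nil_iff.mpr
      intro i hi
      have h0 : kf i = 0 := by simpa using (List.mem_filter.mp hi).2
      have : PySem.List.pyGetD jobs i [] = [] := by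
        have := h0
        simp only [hkf, PySem.List.len] at this
        exact List.eq_nil_of_length_eq_zero (by omega)
      simp [hcontrib, this]
    calc (ks.flatMap (fun c =>
            ((is.map (fun i => (i, kf i))).filter (fun z => z.2 == c)).flatMap
              (fun i => contrib i.1)))
        = ks.flatMap (fun c => (is.filter (fun i => kf i == c)).flatMap contrib) := by
          exact List.flatMap_congr (fun c _ => hbucket c)
      _ = (PySem.List.pyRange M 0 (-1)).flatMap
            (fun c => (is.filter (fun i => kf i == c)).flatMap contrib) := by
          rw [hks, List.flatMap_append]
          simp [hzero]
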